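-- pv_equiv track=rewrite | github.com/skier-song9/extractive-summarization | scripts/generate_live_test_report.py | extract_selected_indices
-- ===== SOURCE A (Python) =====
-- def extract_selected_indices(sentences: list[str], selected_sentences: list[str]) -> list[int]:
--     selected_indices: list[int] = []
--     search_start = 0
--     for selected in selected_sentences:
--         for index in range(search_start, len(sentences)):
--             if sentences[index] == selected:
--                 selected_indices.append(index)
--                 search_start = index + 1
--                 break
--     return selected_indices
-- ===== SOURCE B (Python) =====
-- def extract_selected_indices(sentences: list[str], selected_sentences: list[str]) -> list[int]:
--     # Index every sentence's occurrence positions once, then answer each query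
--     # with a binary search for the first occurrence >= search_start.
--     occ: dict[str, list[int]] = {}
--     for i, s in enumerate(sentences):
--         occ.setdefault(s, []).append(i)
--     selected_indices: list[int] = []
--     search_start = 0
--     for selected in selected_sentences:
--         lst = occ.get(selected, [])
--         lo, hi = 0, len(lst)
--         while lo < hi:
--             mid = (lo + hi) // 2
--             if lst[mid] < search_start:
--                 lo = mid + 1
--             else:
--                 hi = mid
--         if lo < len(lst):
--             idx = lst[lo]
--             selected_indices.append(idx)
--             search_start = idx + 1
--     return selected_indices
-- ===== Notes on version B (the rewrite author's own statement) =====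
-- stated objective: faster
-- what changed: B builds a value-to-sorted-occurrence-index dictionary in one pass and answers each selected sentence with a hand-written binary search (bisect_left) for the first occurrence >= search_start, replacing A's linear rescan of the tail of sentences for every selected sentence.
import Mathlib
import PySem

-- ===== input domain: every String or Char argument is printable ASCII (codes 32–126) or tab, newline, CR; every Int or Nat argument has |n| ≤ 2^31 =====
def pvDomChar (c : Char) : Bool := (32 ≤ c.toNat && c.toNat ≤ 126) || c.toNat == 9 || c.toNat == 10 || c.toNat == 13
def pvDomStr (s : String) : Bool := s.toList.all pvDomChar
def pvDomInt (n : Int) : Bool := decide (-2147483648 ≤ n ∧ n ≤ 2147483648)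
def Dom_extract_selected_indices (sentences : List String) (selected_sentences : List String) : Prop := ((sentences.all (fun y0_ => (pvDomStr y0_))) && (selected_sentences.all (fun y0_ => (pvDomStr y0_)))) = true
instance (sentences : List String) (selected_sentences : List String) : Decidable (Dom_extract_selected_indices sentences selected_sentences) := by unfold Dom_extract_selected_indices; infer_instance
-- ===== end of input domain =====

-- B replaces A's per-query linear rescan by a sentence→occurrence-index dictionary plus a binary search.

-- ===== PORT A =====
-- inner 'for index in range(search_start, len(sentences)): if sentences[index] == selected: … break'
def pvFindLoop (xs : List String) (sel : String) : List Int → Option Int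
  | [] => none
  | i :: is => if PySem.List.pyGetD xs i "" = sel then some i else pvFindLoop xs sel is

def extract_selected_indices (sentences : List String) (selected_sentences : List String) : List Int :=
  (selected_sentences.foldl
    (fun (st : List Int × Int) selected =>
      match pvFindLoop sentences selected (PySem.List.pyRange st.2 (sentences.length : Int) 1) with
      | some index => (st.1 ++ [index], index + 1)
      | none => st)
    ([], 0)).1

-- ===== PORT B =====
-- hand-written bisect_left loop from Source B: first position in lst whose value is ≥ target, within [lo, hi)
def pvBisect (lst : List Int) (target : Int) (lo hi : Int) : Int :=
  if h : lo < hi then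
    let mid := PySem.Int.floordiv (lo + hi) 2
    if PySem.List.pyGetD lst mid 0 < target then pvBisect lst target (mid + 1) hi
    else pvBisect lst target lo mid
  else lo
termination_by (hi - lo).toNat
decreasing_by
  · have hb := PySem.Int.floordiv_two_mid_bounds (le_of_lt h)
    omega
  · have hb := PySem.Int.floordiv_two_mid_bounds (le_of_lt h)
    have hlt : PySem.Int.floordiv (lo + hi) 2 < hi :=
      (PySem.Int.floordiv_lt_iff_lt_mul (by omega)).mpr (by omega)
    omega

def pvOccDict (sentences : List String) : PySem.Dict String (List Int) :=
  (PySem.List.enumerate sentences 0).foldl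
    (fun (d : PySem.Dict String (List Int)) p => d.insert p.2 (d.getD p.2 [] ++ [p.1]))
    PySem.Dict.empty

def extract_selected_indices_alt (sentences : List String) (selected_sentences : List String) : List Int :=
  let occ := pvOccDict sentences
  (selected_sentences.foldl
    (fun (st : List Int × Int) selected =>
      let lst := occ.getD selected []
      let lo := pvBisect lst st.2 0 (lst.length : Int)
      if lo < (lst.length : Int) then
        let idx := PySem.List.pyGetD lst lo 0
        (st.1 ++ [idx], idx + 1)
      else st)
    ([], 0)).1

-- ===== PRECONDITION & SPEC =====
def Spec_extract_selected_indices (sentences : List String) (selected_sentences : List String) (out : List Int) : Prop := out = extract_selected_indices_alt sentences selected_sentences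
instance (sentences : List String) (selected_sentences : List String) (out : List Int) : Decidable (Spec_extract_selected_indices sentences selected_sentences out) := by unfold Spec_extract_selected_indices; infer_instance

-- ===== CLAIM (what is proved, stated in full; the proofs are below) =====
def Claim_equal_extract_selected_indices : Prop := ∀ (sentences : List String) (selected_sentences : List String), Dom_extract_selected_indices sentences selected_sentences → Spec_extract_selected_indices sentences selected_sentences (extract_selected_indices sentences selected_sentences)

-- ===== LEMMAS AND PROOFS =====

-- occurrence list of v in xs, in increasing order
def pvOccList (xs : List String) (v : String) : List Int :=
  (((List.range xs.length).filter (fun i => decide (xs.getD i "" = v))).map (fun (i : Nat) => (i : Int)) : List Int)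

theorem pvOccList_snoc (xs : List String) (x : String) (v : String) :
    pvOccList (xs ++ [x]) v =
      pvOccList xs v ++ (if x = v then [((xs.length : Nat) : Int)] else []) := by
  unfold pvOccList
  rw [List.length_append, List.length_singleton, List.range_succ, List.filter_append]
  rw [List.filter_congr (q := fun i => decide (xs.getD i "" = v)) ?_]
  · simp only [List.filter]
    simp [List.getD]
    split_ifs <;> simp_all
  · intro i hi
    simp only [List.mem_range] at hi
    simp [List.getD, List.getElem?_append_left hi]

theorem pvOccDict_getD (xs : List String) (v : String) :
    (pvOccDict xs).getD v [] = pvOccList xs v := by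
  induction xs using List.reverseRecOn with
  | nil => simp [pvOccDict, pvOccList]
  | append_singleton ys x ih =>
    unfold pvOccDict
    rw [PySem.List.enumerate_append, List.foldl_append]
    simp only [PySem.List.enumerate, List.foldl]
    rw [pvOccList_snoc]
    rw [PySem.Dict.getD_insert]
    by_cases hvx : v = x
    · subst hvx
      simp [pvOccDict] at ih
      simp [ih]
    · simp [hvx, Ne.symm hvx]
      exact ih

theorem pvOccList_mem {xs : List String} {v : String} {i : Int}
    (h : i ∈ pvOccList xs v) : 0 ≤ i ∧ i < (xs.length : Int) := by
  unfold pvOccList at h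
  simp only [List.mem_map, List.mem_filter, List.mem_range] at h
  obtain ⟨k, ⟨hk, _⟩, rfl⟩ := h
  constructor <;> omega

theorem pvOccList_sorted (xs : List String) (v : String) :
    (pvOccList xs v).Pairwise (· < ·) := by
  unfold pvOccList
  refine List.Pairwise.map _ ?_ (List.Pairwise.filter _ List.pairwise_lt_range)
  intro a b hab
  exact_mod_cast hab

theorem pvOccList_mem_iff (xs : List String) (v : String) (k : Nat) :
    ((k : Int) ∈ pvOccList xs v) ↔ (k < xs.length ∧ xs.getD k "" = v) := by
  unfold pvOccList
  simp only [List.mem_map, List.mem_filter, List.mem_range, decide_eq_true_eq]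
  constructor
  · rintro ⟨j, hj, hcast⟩
    have : j = k := by exact_mod_cast hcast
    subst this; exact hj
  · intro hk; exact ⟨k, hk, rfl⟩

-- in a strictly sorted list, the element at position (countP (· < s)) is the first one that is ≥ s
theorem pv_sorted_countP_iff {lst : List Int} (hs : lst.Pairwise (· < ·)) (s : Int) :
    ∀ j (hj : j < lst.length), (lst[j] < s ↔ j < lst.countP (fun x => decide (x < s))) := by
  induction lst with
  | nil => intro j hj; simp at hj
  | cons a t ih =>
    have ha : ∀ x ∈ t, a < x := fun x hx => (List.pairwise_cons.mp hs).1 x hx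
    have ht : t.Pairwise (· < ·) := (List.pairwise_cons.mp hs).2
    intro j hj
    by_cases hlt : a < s
    · have hc : (a :: t).countP (fun x => decide (x < s)) = t.countP (fun x => decide (x < s)) + 1 := by
        simp [hlt]
      cases j with
      | zero => simpa [hc] using hlt
      | succ j =>
        have hj' : j < t.length := by simpa using hj
        have := ih ht j hj'
        simp only [List.getElem_cons_succ, hc]
        omega
    · have ht0 : t.countP (fun x => decide (x < s)) = 0 := by
        rw [List.countP_eq_zero]
        intro x hx
        simp only [decide_eq_true_eq]
        have := ha x hx
        omega
      have hc : (a :: t).countP (fun x => decide (x < s)) = 0 := by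
        simp [hlt, ht0]
      rw [hc]
      cases j with
      | zero => simpa using hlt
      | succ j =>
        have hj' : j < t.length := by simpa using hj
        simp only [List.getElem_cons_succ]
        constructor
        · intro h; exact absurd h (by have := ha t[j] (List.getElem_mem hj'); omega)
        · omega

-- the bisect loop computes countP (· < target) on a strictly sorted list
theorem pvBisect_eq_countP (lst : List Int) (s : Int) (hs : lst.Pairwise (· < ·)) :
    ∀ (lo hi : Int), 0 ≤ lo → lo ≤ (lst.countP (fun x => decide (x < s)) : Int) →
      (lst.countP (fun x => decide (x < s)) : Int) ≤ hi → hi ≤ (lst.length : Int) →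
      pvBisect lst s lo hi = (lst.countP (fun x => decide (x < s)) : Int) := by
  intro lo hi
  generalize hm : (hi - lo).toNat = fuel
  induction fuel using Nat.strong_induction_on generalizing lo hi with
  | _ fuel ih =>
    intro h0 hlc hch hhl
    unfold pvBisect
    split_ifs with h
    · have hb := PySem.Int.floordiv_two_mid_bounds (le_of_lt h)
      have hmidlt : PySem.Int.floordiv (lo + hi) 2 < hi :=
        (PySem.Int.floordiv_lt_iff_lt_mul (by omega)).mpr (by omega)
      set mid := PySem.Int.floordiv (lo + hi) 2 with hmid
      have hmr : 0 ≤ mid ∧ mid < (lst.length : Int) := by omega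
      have hget : PySem.List.pyGetD lst mid 0 = lst[mid.toNat]'(by omega) :=
        PySem.List.pyGetD_eq_getElem lst 0 hmr.1 hmr.2
      have hiff := pv_sorted_countP_iff hs s mid.toNat (by omega)
      by_cases hv : PySem.List.pyGetD lst mid 0 < s
      · rw [if_pos hv]
        have : lst[mid.toNat]'(by omega) < s := by rw [← hget]; exact hv
        have hmc : mid.toNat < lst.countP (fun x => decide (x < s)) := hiff.mp this
        exact ih (hi - (mid + 1)).toNat (by omega) (mid + 1) hi rfl (by omega) (by omega) (by omega) hhl
      · rw [if_neg hv]
        have : ¬ lst[mid.toNat]'(by omega) < s := by rw [← hget]; exact hv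
        have hmc : ¬ mid.toNat < lst.countP (fun x => decide (x < s)) := fun hc => this (hiff.mpr hc)
        exact ih (mid - lo).toNat (by omega) lo mid rfl h0 hlc (by omega) (by omega)
    · omega

-- A's linear scan from s returns the element of the occurrence list at position countP (· < s)
theorem pvFindLoop_eq (xs : List String) (v : String) :
    ∀ (s : Int), 0 ≤ s →
      pvFindLoop xs v (PySem.List.pyRange s (xs.length : Int) 1) =
        (pvOccList xs v)[((pvOccList xs v).countP (fun x => decide (x < s)))]? := by
  intro s
  generalize hm : ((xs.length : Int) - s).toNat = fuel
  induction fuel using Nat.strong_induction_on generalizing s with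
  | _ fuel ih =>
    intro h0
    set lst := pvOccList xs v with hlst
    by_cases h : s < (xs.length : Int)
    · rw [PySem.List.pyRange_one_cons h]
      unfold pvFindLoop
      have hsn : s.toNat < xs.length := by omega
      have hscast : ((s.toNat : Nat) : Int) = s := by omega
      by_cases hv : PySem.List.pyGetD xs s "" = v
      · rw [if_pos hv]
        -- s is in the occurrence list; its position is countP (· < s)
        have hmem : (s.toNat : Int) ∈ lst := by
          rw [hlst, pvOccList_mem_iff]
          refine ⟨hsn, ?_⟩
          have := PySem.List.pyGetD_eq_getElem xs "" h0 (by exact_mod_cast h)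
          rw [this] at hv
          rw [List.getD_eq_getElem xs "" hsn]
          exact hv
        obtain ⟨p, hp, hpe⟩ := List.mem_iff_getElem.mp hmem
        have hsorted := pvOccList_sorted xs v
        rw [← hlst] at hsorted
        have hiff := pv_sorted_countP_iff hsorted s
        -- position p satisfies: lst[p] = s, so p = countP (· < s)
        have hcp : p = lst.countP (fun x => decide (x < s)) := by
          have h1 := hiff p hp
          rw [hpe, hscast] at h1
          by_cases hplt : p < lst.countP (fun x => decide (x < s))
          · exfalso; have := h1.mpr hplt; omega
          · have hge : lst.countP (fun x => decide (x < s)) ≤ p := by omega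
            by_cases hq : lst.countP (fun x => decide (x < s)) < p
            · exfalso
              have hqlen : lst.countP (fun x => decide (x < s)) < lst.length := by omega
              have h2' : ¬ lst[lst.countP (fun x => decide (x < s))] < s := by
                intro hc
                have := (hiff _ hqlen).mp hc
                omega
              -- lst[c] ≥ s and lst[c] < lst[p] = s by sortedness: contradiction
              have hlt : lst[lst.countP (fun x => decide (x < s))]'hqlen < lst[p]'hp :=
                List.pairwise_iff_getElem.mp hsorted _ _ hqlen hp hq
              rw [hpe, hscast] at hlt
              omega
            · omega
        subst hcp
        rw [List.getElem?_eq_getElem hp, hpe, hscast]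
      · rw [if_neg hv]
        have hns : (s.toNat : Int) ∉ lst := by
          rw [hlst, pvOccList_mem_iff]
          rintro ⟨-, hget⟩
          apply hv
          have := PySem.List.pyGetD_eq_getElem xs "" h0 (by exact_mod_cast h)
          rw [this, ← List.getD_eq_getElem xs "" hsn]
          exact hget
        have hcount : lst.countP (fun x => decide (x < s + 1)) = lst.countP (fun x => decide (x < s)) := by
          apply List.countP_congr
          intro x hx
          have hx0 : 0 ≤ x := (pvOccList_mem (hlst ▸ hx)).1
          have hne : x ≠ s := by
            intro he
            subst he
            apply hns
            have hxx : ((x.toNat : Nat) : Int) = x := by omega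
            rw [hxx]
            exact hx
          have hiffx : (x < s + 1) ↔ (x < s) := by omega
          simp [hiffx]
        have := ih ((xs.length : Int) - (s + 1)).toNat (by omega) (s + 1) rfl (by omega)
        rw [hcount] at this
        exact this
    · rw [PySem.List.pyRange_one_eq_nil (by omega)]
      unfold pvFindLoop
      have hall : lst.countP (fun x => decide (x < s)) = lst.length := by
        rw [List.countP_eq_length]
        intro x hx
        have := pvOccList_mem (hlst ▸ hx)
        simp only [decide_eq_true_eq]
        omega
      rw [hall, List.getElem?_eq_none (le_refl _)]

-- one query step of A equals one query step of B
theorem pv_step_eq (xs : List String) (v : String) (acc : List Int) (s : Int) (h0 : 0 ≤ s) :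
    (match pvFindLoop xs v (PySem.List.pyRange s (xs.length : Int) 1) with
      | some index => (acc ++ [index], index + 1)
      | none => (acc, s)) =
    (let lst := (pvOccDict xs).getD v []
     let lo := pvBisect lst s 0 (lst.length : Int)
     if lo < (lst.length : Int) then
       let idx := PySem.List.pyGetD lst lo 0
       (acc ++ [idx], idx + 1)
     else (acc, s)) := by
  simp only [pvOccDict_getD]
  set lst := pvOccList xs v with hlst
  have hsorted : lst.Pairwise (· < ·) := pvOccList_sorted xs v
  set c := lst.countP (fun x => decide (x < s)) with hc
  have hclen : c ≤ lst.length := List.countP_le_length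
  have hbis : pvBisect lst s 0 (lst.length : Int) = (c : Int) :=
    pvBisect_eq_countP lst s hsorted 0 (lst.length : Int) le_rfl (by exact_mod_cast Int.natCast_nonneg c) (by exact_mod_cast hclen) le_rfl
  rw [pvFindLoop_eq xs v s h0, ← hlst, ← hc, hbis]
  by_cases hlt : c < lst.length
  · rw [List.getElem?_eq_getElem hlt]
    have hcast : ((c : Int) : Int) < (lst.length : Int) := by exact_mod_cast hlt
    rw [if_pos hcast]
    have hget : PySem.List.pyGetD lst (c : Int) 0 = lst[c] := by
      have := PySem.List.pyGetD_eq_getElem (xs := lst) (d := 0) (i := (c : Int)) (by exact_mod_cast Int.natCast_nonneg c) hcast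
      simpa using this
    rw [hget]
  · have hce : c = lst.length := by omega
    rw [hce, List.getElem?_eq_none (le_refl _)]
    rw [if_neg (by exact_mod_cast lt_irrefl (lst.length : Int))]

-- every index A appends is nonnegative, keeping search_start nonnegative
theorem pvFindLoop_nonneg (xs : List String) (v : String) (s i : Int) (h0 : 0 ≤ s)
    (h : pvFindLoop xs v (PySem.List.pyRange s (xs.length : Int) 1) = some i) : 0 ≤ i := by
  rw [pvFindLoop_eq xs v s h0] at h
  have hmem : i ∈ pvOccList xs v := List.mem_of_getElem? h
  exact (pvOccList_mem hmem).1

theorem pv_fold_eq (xs : List String) (sel : List String) :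
    ∀ (acc : List Int) (s : Int), 0 ≤ s →
      sel.foldl
        (fun (st : List Int × Int) selected =>
          match pvFindLoop xs selected (PySem.List.pyRange st.2 (xs.length : Int) 1) with
          | some index => (st.1 ++ [index], index + 1)
          | none => st)
        (acc, s) =
      sel.foldl
        (fun (st : List Int × Int) selected =>
          let lst := (pvOccDict xs).getD selected []
          let lo := pvBisect lst st.2 0 (lst.length : Int)
          if lo < (lst.length : Int) then
            let idx := PySem.List.pyGetD lst lo 0
            (st.1 ++ [idx], idx + 1)
          else st)
        (acc, s) := by
  induction sel with
  | nil => intro acc s h0; rfl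
  | cons v rest ih =>
    intro acc s h0
    simp only [List.foldl]
    have hstep := pv_step_eq xs v acc s h0
    rcases hfind : pvFindLoop xs v (PySem.List.pyRange s (xs.length : Int) 1) with _ | i
    · rw [hfind] at hstep
      simp only at hstep
      rw [← hstep]
      exact ih acc s h0
    · rw [hfind] at hstep
      simp only at hstep
      rw [← hstep]
      exact ih (acc ++ [i]) (i + 1) (by have := pvFindLoop_nonneg xs v s i h0 hfind; omega)

-- ===== VERDICT (by name: the statement is the Claim_ definition above) =====
theorem extract_selected_indices_spec : Claim_equal_extract_selected_indices := by
  intro sentences selected_sentences _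
  unfold Spec_extract_selected_indices extract_selected_indices extract_selected_indices_alt
  rw [pv_fold_eq sentences selected_sentences [] 0 le_rfl]
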